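-- pv_equiv track=rewrite | github.com/elbrus-56/algorithms | yandex/lect_4.py | countingbeatingrooks
-- ===== SOURCE A (Python) =====
-- def countingbeatingrooks(rookcoords):
--     def addrook(roworcol, key):
--         if key not in roworcol:
--             roworcol[key] = 0
--         roworcol[key] += 1
--
--     def countpairs(roworcol):
--         pairs = 0
--         for key in roworcol:
--             pairs += roworcol[key] - 1
--
--         return pairs
--
--     rooksinrow = {}
--     rooksincol = {}
--
--     for row, col in rookcoords:
--         addrook(rooksinrow, row)
--         addrook(rooksincol, col)
--
--     return countpairs(rooksinrow) + countpairs(rooksincol)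
-- ===== SOURCE B (Python) =====
-- def countingbeatingrooks(rookcoords):
--     n = 0
--     rows = set()
--     cols = set()
--     for row, col in rookcoords:
--         n += 1
--         rows.add(row)
--         cols.add(col)
--     return 2 * n - len(rows) - len(cols)
-- ===== Notes on version B (the rewrite author's own statement) =====
-- stated objective: simpler
-- what changed: Replaces the two counter dicts and the separate summation passes over their keys by a single pass that counts elements and collects distinct rows/cols in sets, returning the closed form 2*n - len(rows) - len(cols).
import Mathlib
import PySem

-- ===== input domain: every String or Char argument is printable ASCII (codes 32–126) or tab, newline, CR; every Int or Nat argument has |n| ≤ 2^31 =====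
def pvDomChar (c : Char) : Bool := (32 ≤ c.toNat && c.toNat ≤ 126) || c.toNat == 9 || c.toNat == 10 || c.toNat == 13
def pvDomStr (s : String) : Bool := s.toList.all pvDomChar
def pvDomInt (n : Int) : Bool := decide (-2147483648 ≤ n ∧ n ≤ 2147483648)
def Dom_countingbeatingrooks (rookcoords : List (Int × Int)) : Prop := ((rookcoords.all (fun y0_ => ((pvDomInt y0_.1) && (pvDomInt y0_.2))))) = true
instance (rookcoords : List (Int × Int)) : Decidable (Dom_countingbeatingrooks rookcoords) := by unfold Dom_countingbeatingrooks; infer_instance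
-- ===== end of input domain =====

-- B replaces A's two counter dicts plus summation passes by one pass collecting a count and two sets, returning the closed form 2*n - |rows| - |cols| (objective: simpler).


-- ===== PORT A =====
-- addrook: if key not in roworcol: roworcol[key] = 0; roworcol[key] += 1
def pvAddrook (d : PySem.Dict Int Int) (key : Int) : PySem.Dict Int Int :=
  let d1 := if d.contains key then d else d.insert key 0
  d1.modify key 0 (· + 1)

-- countpairs: pairs = 0; for key in roworcol: pairs += roworcol[key] - 1
def pvCountpairs (d : PySem.Dict Int Int) : Int :=
  d.keys.foldl (fun pairs key => pairs + (d.getD key 0 - 1)) 0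

def countingbeatingrooks (rookcoords : List (Int × Int)) : Int :=
  let st := rookcoords.foldl
    (fun (st : PySem.Dict Int Int × PySem.Dict Int Int) rc =>
      (pvAddrook st.1 rc.1, pvAddrook st.2 rc.2))
    (PySem.Dict.empty, PySem.Dict.empty)
  pvCountpairs st.1 + pvCountpairs st.2

-- ===== PORT B =====
def countingbeatingrooks_alt (rookcoords : List (Int × Int)) : Int :=
  let st := rookcoords.foldl
    (fun (st : Int × PySem.Set Int × PySem.Set Int) rc =>
      (st.1 + 1, PySem.Set.add st.2.1 rc.1, PySem.Set.add st.2.2 rc.2))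
    ((0 : Int), PySem.Set.empty, PySem.Set.empty)
  2 * st.1 - PySem.Set.len st.2.1 - PySem.Set.len st.2.2

-- ===== PRECONDITION & SPEC =====
def Spec_countingbeatingrooks (rookcoords : List (Int × Int)) (out : Int) : Prop := out = countingbeatingrooks_alt rookcoords
instance (rookcoords : List (Int × Int)) (out : Int) : Decidable (Spec_countingbeatingrooks rookcoords out) := by unfold Spec_countingbeatingrooks; infer_instance

-- ===== CLAIM (what is proved, stated in full; the proofs are below) =====
def Claim_equal_countingbeatingrooks : Prop := ∀ (rookcoords : List (Int × Int)), Dom_countingbeatingrooks rookcoords → Spec_countingbeatingrooks rookcoords (countingbeatingrooks rookcoords)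

-- ===== LEMMAS AND PROOFS =====

-- addrook keeps the key list equal to the set of keys seen so far
theorem pvAddrook_keys (d : PySem.Dict Int Int) (k : Int) :
    (pvAddrook d k).keys = PySem.Set.add d.keys k := by
  unfold pvAddrook
  by_cases h : d.contains k = true
  · rw [if_pos h, PySem.Dict.keys_modify,
      PySem.Dict.keys_insert_of_contains _ _ h,
      PySem.Set.add_of_mem ((PySem.Dict.contains_iff_mem_keys d k).1 h)]
  · have hk : k ∉ d.keys := fun hm => h ((PySem.Dict.contains_iff_mem_keys d k).2 hm)
    have hc : d.contains k = false := by simpa using h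
    rw [if_neg h, PySem.Dict.keys_modify,
      PySem.Dict.keys_insert_of_contains _ _ (PySem.Dict.contains_insert_self d k 0),
      PySem.Dict.keys_insert_of_not_contains d 0 hc,
      PySem.Set.add_of_not_mem hk]

theorem pvCountpairs_eq_sum (d : PySem.Dict Int Int) :
    pvCountpairs d = (d.keys.map (fun key => d.getD key 0 - 1)).sum := by
  simpa using PySem.List.foldl_add d.keys (fun key => d.getD key 0 - 1) 0

-- one addrook raises countpairs by 1 exactly when the key was already present
theorem pvAddrook_count (d : PySem.Dict Int Int) (k : Int) (hnd : d.keys.Nodup) :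
    pvCountpairs (pvAddrook d k)
      = pvCountpairs d + (if k ∈ d.keys then (1 : Int) else 0) := by
  rw [pvCountpairs_eq_sum, pvCountpairs_eq_sum, pvAddrook_keys]
  by_cases hk : k ∈ d.keys
  · rw [PySem.Set.add_of_mem hk, if_pos hk]
    have hc : d.contains k = true := (PySem.Dict.contains_iff_mem_keys d k).2 hk
    have hget : ∀ x, (pvAddrook d k).getD x 0 = if x = k then d.getD k 0 + 1 else d.getD x 0 := by
      intro x
      unfold pvAddrook
      rw [if_pos hc, PySem.Dict.getD_modify]
    have hperm : d.keys.Perm (k :: d.keys.erase k) := List.perm_cons_erase hk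
    rw [(hperm.map (fun key => (pvAddrook d k).getD key 0 - 1)).sum_eq,
        (hperm.map (fun key => d.getD key 0 - 1)).sum_eq]
    have hknot : k ∉ d.keys.erase k := hnd.not_mem_erase
    have hcongr : (d.keys.erase k).map (fun key => (pvAddrook d k).getD key 0 - 1)
        = (d.keys.erase k).map (fun key => d.getD key 0 - 1) := by
      apply List.map_congr_left
      intro x hx
      have hxk : x ≠ k := fun h => hknot (h ▸ hx)
      rw [hget x, if_neg hxk]
    rw [List.map_cons, List.map_cons, List.sum_cons, List.sum_cons, hcongr, hget k, if_pos rfl]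
    ring
  · have hc : d.contains k = false := by
      by_contra h
      exact hk ((PySem.Dict.contains_iff_mem_keys d k).1 (by simpa using h))
    rw [PySem.Set.add_of_not_mem hk, if_neg hk]
    have hget : ∀ x, (pvAddrook d k).getD x 0 = if x = k then 1 else d.getD x 0 := by
      intro x
      unfold pvAddrook
      rw [if_neg (by simp [hc]), PySem.Dict.getD_modify]
      by_cases hxk : x = k
      · subst hxk; rw [if_pos rfl, if_pos rfl, PySem.Dict.getD_insert, if_pos rfl]; norm_num
      · rw [if_neg hxk, if_neg hxk, PySem.Dict.getD_insert, if_neg hxk]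
    have hcongr : d.keys.map (fun key => (pvAddrook d k).getD key 0 - 1)
        = d.keys.map (fun key => d.getD key 0 - 1) := by
      apply List.map_congr_left
      intro x hx
      have hxk : x ≠ k := fun h => hk (h ▸ hx)
      rw [hget x, if_neg hxk]
    rw [List.map_append, List.sum_append, hcongr, List.map_cons, List.map_nil,
        List.sum_cons, List.sum_nil, hget k, if_pos rfl]
    ring

-- loop invariant for one side (rows or columns): countpairs + |distinct| = seen
theorem pvSide_inv (f : Int × Int → Int) :
    ∀ (xs : List (Int × Int)) (d : PySem.Dict Int Int) (s : PySem.Set Int),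
      d.keys = s → s.Nodup →
      pvCountpairs (xs.foldl (fun d rc => pvAddrook d (f rc)) d)
        + ((xs.foldl (fun s rc => PySem.Set.add s (f rc)) s).length : Int)
      = pvCountpairs d + (s.length : Int) + xs.length := by
  intro xs
  induction xs with
  | nil => intro d s _ _; simp
  | cons x t ih =>
    intro d s hks hnd
    have hks' : (pvAddrook d (f x)).keys = PySem.Set.add s (f x) := by
      rw [pvAddrook_keys, hks]
    have hnd' : (PySem.Set.add s (f x)).Nodup := PySem.Set.nodup_add s (f x) hnd
    have hrec := ih (pvAddrook d (f x)) (PySem.Set.add s (f x)) hks' hnd'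
    simp only [List.foldl_cons] at hrec ⊢
    rw [hrec, pvAddrook_count d (f x) (hks ▸ hnd)]
    by_cases hm : f x ∈ s
    · rw [PySem.Set.add_of_mem hm, hks, if_pos hm]
      simp only [List.length_cons]
      push_cast
      ring
    · rw [PySem.Set.add_of_not_mem hm, hks, if_neg hm]
      simp only [List.length_cons, List.length_append, List.length_cons, List.length_nil]
      push_cast
      ring

-- A's paired fold splits into its two components
theorem pvPairFold (xs : List (Int × Int)) :
    ∀ (a b : PySem.Dict Int Int),
    (xs.foldl (fun (st : PySem.Dict Int Int × PySem.Dict Int Int) rc =>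
        (pvAddrook st.1 rc.1, pvAddrook st.2 rc.2)) (a, b))
      = (xs.foldl (fun d rc => pvAddrook d rc.1) a,
         xs.foldl (fun d rc => pvAddrook d rc.2) b) := by
  induction xs with
  | nil => intro a b; rfl
  | cons x t ih => intro a b; simp only [List.foldl_cons]; exact ih _ _

-- B's triple fold splits into its three components
theorem pvTripleFold (xs : List (Int × Int)) :
    ∀ (n : Int) (a b : PySem.Set Int),
    (xs.foldl (fun (st : Int × PySem.Set Int × PySem.Set Int) rc =>
        (st.1 + 1, PySem.Set.add st.2.1 rc.1, PySem.Set.add st.2.2 rc.2)) (n, a, b))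
      = (n + xs.length,
         xs.foldl (fun s rc => PySem.Set.add s rc.1) a,
         xs.foldl (fun s rc => PySem.Set.add s rc.2) b) := by
  induction xs with
  | nil => intro n a b; simp
  | cons x t ih =>
    intro n a b
    simp only [List.foldl_cons, ih, List.length_cons]
    rw [Prod.mk.injEq]
    refine ⟨by push_cast; ring, rfl⟩

-- ===== VERDICT (by name: the statement is the Claim_ definition above) =====
theorem countingbeatingrooks_spec : Claim_equal_countingbeatingrooks := by
  intro xs _
  unfold Spec_countingbeatingrooks countingbeatingrooks countingbeatingrooks_alt
  simp only [pvPairFold, pvTripleFold]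
  have h1 := pvSide_inv (fun rc => rc.1) xs PySem.Dict.empty PySem.Set.empty rfl (by simp [PySem.Set.empty])
  have h2 := pvSide_inv (fun rc => rc.2) xs PySem.Dict.empty PySem.Set.empty rfl (by simp [PySem.Set.empty])
  have he : pvCountpairs PySem.Dict.empty = 0 := rfl
  have hl : (((PySem.Set.empty : PySem.Set Int)).length : Int) = 0 := rfl
  rw [he, hl] at h1 h2
  beta_reduce at h1 h2
  simp only [PySem.Set.len, zero_add]
  omega
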